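-- pv_equiv track=rewrite | github.com/SmartHirexZafir/smarthirex-backend | app/logic/generator.py | _difficulty_sequence
-- ===== SOURCE A (Python) =====
-- from typing import List, Dict, Any, Optional
--
-- def _difficulty_sequence(n: int, level: str = "intermediate") -> List[str]:
--     """
--     Returns n difficulty labels in a progressive sequence,
--     adapted to the candidate experience band.
--     """
--     level = (level or "intermediate").strip().lower()
--     if level == "beginner":
--         seq = ["easy", "easy", "medium", "medium"]
--     elif level == "advanced":
--         seq = ["hard", "hard", "expert", "expert"]
--     else:
--         seq = ["medium", "medium", "hard", "expert"]
--     out: List[str] = []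
--     i = 0
--     while len(out) < n:
--         out.append(seq[min(i % len(seq), len(seq) - 1)])
--         i += 1
--     return out[:n]
-- ===== SOURCE B (Python) =====
-- from typing import List
--
-- def _difficulty_sequence(n: int, level: str = "intermediate") -> List[str]:
--     level = (level or "intermediate").strip().lower()
--     if level == "beginner":
--         seq = ["easy", "easy", "medium", "medium"]
--     elif level == "advanced":
--         seq = ["hard", "hard", "expert", "expert"]
--     else:
--         seq = ["medium", "medium", "hard", "expert"]
--     return (seq * (n // len(seq) + 1))[:n]
-- ===== Notes on version B (the rewrite author's own statement) =====
-- stated objective: simpler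
-- what changed: The per-element while loop with modular/clamped indexing is replaced by bulk replication of the chosen 4-label sequence followed by a single slice: (seq * (n//len(seq)+1))[:n].
import Mathlib
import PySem

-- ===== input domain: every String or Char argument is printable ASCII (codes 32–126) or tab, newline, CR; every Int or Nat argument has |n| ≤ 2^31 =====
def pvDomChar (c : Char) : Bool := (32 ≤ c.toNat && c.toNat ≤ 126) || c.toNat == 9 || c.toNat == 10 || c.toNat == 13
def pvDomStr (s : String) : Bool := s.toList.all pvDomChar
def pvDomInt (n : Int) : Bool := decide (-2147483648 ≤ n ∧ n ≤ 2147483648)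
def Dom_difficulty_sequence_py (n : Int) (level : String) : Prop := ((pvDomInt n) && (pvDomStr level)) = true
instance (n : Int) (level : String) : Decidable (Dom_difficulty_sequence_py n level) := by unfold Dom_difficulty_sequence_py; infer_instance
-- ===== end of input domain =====

-- B replaces A's element-by-element while loop (with modular/clamped indexing) by bulk
-- replication of the chosen sequence followed by one slice; same return value everywhere.

-- ===== PORT A =====
-- level = (level or "intermediate").strip().lower()
def pvNormA (level : String) : String :=
  PySem.Str.lower (PySem.Str.strip (if level = "" then "intermediate" else level))

-- the three-way choice of seq
def pvSeqA (level : String) : List String :=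
  if pvNormA level = "beginner" then ["easy", "easy", "medium", "medium"]
  else if pvNormA level = "advanced" then ["hard", "hard", "expert", "expert"]
  else ["medium", "medium", "hard", "expert"]

-- the while loop: fuel = number of remaining iterations (each one appends an element);
-- seq[min(i % len(seq), len(seq)-1)] never goes out of range here, so `.getD ""` is exact
def pvLoopA (seq : List String) (n : Int) : Nat → List String → Int → List String
  | 0, out, _ => out
  | fuel + 1, out, i =>
    if (out.length : Int) < n then
      pvLoopA seq n fuel
        (out ++ [(PySem.List.pyGet? seq (min (PySem.Int.mod i (seq.length : Int)) ((seq.length : Int) - 1))).getD ""])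
        (i + 1)
    else out

def difficulty_sequence_py (n : Int) (level : String) : List String :=
  PySem.List.slice (pvLoopA (pvSeqA level) n n.toNat [] 0) none (some n)

-- ===== PORT B =====
def pvNormB (level : String) : String :=
  PySem.Str.lower (PySem.Str.strip (if level = "" then "intermediate" else level))

def pvSeqB (level : String) : List String :=
  if pvNormB level = "beginner" then ["easy", "easy", "medium", "medium"]
  else if pvNormB level = "advanced" then ["hard", "hard", "expert", "expert"]
  else ["medium", "medium", "hard", "expert"]

-- return (seq * (n // len(seq) + 1))[:n]
def difficulty_sequence_py_alt (n : Int) (level : String) : List String :=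
  PySem.List.slice
    (List.flatten (List.replicate (PySem.Int.floordiv n ((pvSeqB level).length : Int) + 1).toNat (pvSeqB level)))
    none (some n)

-- ===== PRECONDITION & SPEC =====
def Spec_difficulty_sequence_py (n : Int) (level : String) (out : List String) : Prop := out = difficulty_sequence_py_alt n level
instance (n : Int) (level : String) (out : List String) : Decidable (Spec_difficulty_sequence_py n level out) := by unfold Spec_difficulty_sequence_py; infer_instance

-- ===== CLAIM (what is proved, stated in full; the proofs are below) =====
def Claim_equal_difficulty_sequence_py : Prop := ∀ (n : Int) (level : String), Dom_difficulty_sequence_py n level → Spec_difficulty_sequence_py n level (difficulty_sequence_py n level)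

-- ===== LEMMAS AND PROOFS =====

lemma pvSeqB_len (l : String) : (pvSeqB l).length = 4 := by
  unfold pvSeqB
  split_ifs <;> rfl

lemma pvSeq_destruct (s : List String) (hs : s.length = 4) :
    s = [s.getD 0 "", s.getD 1 "", s.getD 2 "", s.getD 3 ""] := by
  match s, hs with
  | [a, b, c, d], _ => rfl

-- the loop invariant: with i = len(out), the loop appends the cyclic continuation
lemma pvLoopA_eq (s : List String) (hs : s.length = 4) (n : Int) :
    ∀ (fuel : Nat) (out : List String) (i : Int), i = (out.length : Int) →
      n ≤ (out.length : Int) + fuel →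
      pvLoopA s n fuel out i
        = out ++ (List.range (n - out.length).toNat).map (fun j => s.getD ((out.length + j) % 4) "") := by
  intro fuel
  induction fuel with
  | zero =>
    intro out i hi hb
    have h0 : (n - (out.length : Int)).toNat = 0 := by omega
    simp [pvLoopA, h0]
  | succ fuel ih =>
    intro out i hi hb
    rw [pvLoopA]
    have hsi : ((s.length : Int)) = 4 := by simp [hs]
    by_cases hlt : (out.length : Int) < n
    · rw [if_pos hlt]
      have hmod : PySem.Int.mod i (s.length : Int) = ((out.length % 4 : Nat) : Int) := by
        rw [hi, hsi]
        exact_mod_cast PySem.Int.mod_natCast out.length 4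
      have hm4 : out.length % 4 < 4 := Nat.mod_lt _ (by omega)
      have hmin : min (((out.length % 4 : Nat)) : Int) ((s.length : Int) - 1)
          = ((out.length % 4 : Nat) : Int) := by
        rw [hsi]; omega
      have hget : (PySem.List.pyGet? s (((out.length % 4 : Nat)) : Int)).getD ""
          = s.getD (out.length % 4) "" := by
        rw [PySem.List.pyGet?_natCast]
        have hlt4 : out.length % 4 < s.length := by omega
        rw [List.getD_eq_getElem?_getD, List.getElem?_eq_getElem hlt4]
      rw [hmod, hmin, hget]
      rw [ih (out ++ [s.getD (out.length % 4) ""]) (i + 1)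
            (by simp [hi]) (by simp; push_cast at hb ⊢; omega)]
      simp only [List.length_append, List.length_cons, List.length_nil, Nat.zero_add]
      rw [List.append_assoc]
      congr 1
      have ht : (n - (out.length : Int)).toNat = (n - ((out.length : Int) + 1)).toNat + 1 := by
        omega
      push_cast
      rw [ht, List.range_succ_eq_map, List.map_cons, List.map_map]
      rw [List.singleton_append]
      congr 1
      apply List.map_congr_left
      intro a _
      simp only [Function.comp_apply]
      congr 1
      omega
    · rw [if_neg hlt]
      have h0 : (n - (out.length : Int)).toNat = 0 := by omega
      simp [h0]

lemma pvFlatten_rep (s : List String) (hs : s.length = 4) :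
    ∀ k : Nat, List.flatten (List.replicate k s)
      = (List.range (4 * k)).map (fun j => s.getD (j % 4) "") := by
  intro k
  induction k with
  | zero => simp
  | succ k ih =>
    rw [List.replicate_succ', List.flatten_append, ih]
    have h4 : 4 * (k + 1) = (4 * k + 1 + 1 + 1) + 1 := by omega
    rw [h4, List.range_succ, List.range_succ, List.range_succ, List.range_succ]
    simp only [List.map_append, List.map_cons, List.map_nil]
    have e0 : (4 * k) % 4 = 0 := by omega
    have e1 : (4 * k + 1) % 4 = 1 := by omega
    have e2 : (4 * k + 1 + 1) % 4 = 2 := by omega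
    have e3 : (4 * k + 1 + 1 + 1) % 4 = 3 := by omega
    rw [e0, e1, e2, e3]
    simp only [List.append_assoc]
    congr 1
    simp only [List.flatten_cons, List.flatten_nil, List.append_nil]
    conv_lhs => rw [pvSeq_destruct s hs]
    rfl

lemma pv_main (s : List String) (hs : s.length = 4) (n : Int) :
    PySem.List.slice (pvLoopA s n n.toNat [] 0) none (some n)
      = PySem.List.slice
          (List.flatten (List.replicate (PySem.Int.floordiv n ((s.length : Int)) + 1).toNat s))
          none (some n) := by
  have hsi : ((s.length : Int)) = 4 := by simp [hs]
  by_cases hpos : 0 < n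
  · have h0 : (0 : Int) ≤ n := le_of_lt hpos
    rw [PySem.List.slice_to _ h0, PySem.List.slice_to _ h0]
    rw [pvLoopA_eq s hs n n.toNat [] 0 (by simp) (by simp)]
    rw [pvFlatten_rep s hs]
    have hle4 : n.toNat ≤ 4 * (PySem.Int.floordiv n ((s.length : Int)) + 1).toNat := by
      rw [hsi]
      have h1 := PySem.Int.floordiv_mul_add_mod n 4
      have h2 := PySem.Int.mod_nonneg n (b := 4) (by omega)
      have h3 := PySem.Int.mod_lt n (b := 4) (by omega)
      omega
    simp only [List.nil_append, List.length_nil, Nat.cast_zero, Int.sub_zero, Nat.zero_add]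
    rw [← List.map_take, List.take_range, Nat.min_self]
    rw [← List.map_take, List.take_range, Nat.min_eq_left hle4]
  · have h0 : n.toNat = 0 := by omega
    have hA : pvLoopA s n n.toNat [] 0 = [] := by rw [h0]; rfl
    rw [hA]
    by_cases hz : n = 0
    · subst hz
      rw [hsi]
      have hfd : (PySem.Int.floordiv (0 : Int) 4 + 1).toNat = 1 := by decide
      rw [hfd]
      rw [PySem.List.slice_to _ (by omega), PySem.List.slice_to _ (by omega)]
      simp
    · have hk : (PySem.Int.floordiv n ((s.length : Int)) + 1).toNat = 0 := by
        rw [hsi]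
        have h1 := PySem.Int.floordiv_mul_add_mod n 4
        have h2 := PySem.Int.mod_nonneg n (b := 4) (by omega)
        have h3 := PySem.Int.mod_lt n (b := 4) (by omega)
        omega
      rw [hk]
      rfl

theorem pv_spec_aux (n : Int) (level : String) :
    difficulty_sequence_py n level = difficulty_sequence_py_alt n level :=
  pv_main (pvSeqB level) (pvSeqB_len level) n

-- ===== VERDICT (by name: the statement is the Claim_ definition above) =====
theorem difficulty_sequence_py_spec : Claim_equal_difficulty_sequence_py := by
  intro n level _
  unfold Spec_difficulty_sequence_py
  exact pv_spec_aux n level
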